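-- pv_equiv track=rewrite | github.com/Semeriuss/A2SV-Labs | 44. k_dominant.py | minKDominant
-- ===== SOURCE A (Python) =====
-- def minKDominant(inputChars):
--     n = len(inputChars)
--     k = n
--
--     for pos in range(26):
--         letter = chr(ord('a') + pos)
--         currentk = last_occurence = 0
--         for i, char in enumerate(inputChars):
--             if letter == char:
--                 currentk = max(currentk, i - last_occurence)
--                 last_occurence = i
--         currentk = max(currentk, n - last_occurence)
--         k = min(currentk, k)
--     return k
-- ===== SOURCE B (Python) =====
-- def minKDominant(inputChars):
--     n = len(inputChars)
--     buckets = [[] for _ in range(26)]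
--     for i, ch in enumerate(inputChars):
--         p = ord(ch) - ord('a')
--         if 0 <= p < 26:
--             buckets[p].append(i)
--     k = n
--     for occ in buckets:
--         if occ:
--             gap = prev = occ[0]
--             for b in occ[1:]:
--                 gap = max(gap, b - prev)
--                 prev = b
--             k = min(k, max(gap, n - prev))
--     return k
-- ===== Notes on version B (the rewrite author's own statement) =====
-- stated objective: faster
-- what changed: Replaces A's 26 full scans of the string (one per letter) with a single grouping pass that collects each lowercase letter's occurrence indices into 26 buckets, followed by one gap scan per bucket.
import Mathlib
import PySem

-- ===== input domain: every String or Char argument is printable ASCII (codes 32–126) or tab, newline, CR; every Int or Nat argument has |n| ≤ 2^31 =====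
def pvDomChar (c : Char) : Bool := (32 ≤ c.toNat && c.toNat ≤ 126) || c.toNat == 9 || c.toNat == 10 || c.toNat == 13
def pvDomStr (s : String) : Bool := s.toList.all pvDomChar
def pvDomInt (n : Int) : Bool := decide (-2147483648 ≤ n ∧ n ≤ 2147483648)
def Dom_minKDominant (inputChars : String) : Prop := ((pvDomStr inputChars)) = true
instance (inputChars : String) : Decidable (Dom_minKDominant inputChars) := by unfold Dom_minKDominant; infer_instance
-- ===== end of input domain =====

-- B replaces A's 26 full scans of the string (one per letter) by one grouping pass
-- into 26 occurrence-index buckets plus one gap scan per bucket (constant-factor faster).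

-- ===== PORT A =====
def minKDominant (inputChars : String) : Int :=
  let chars := inputChars.toList
  let n : Int := (chars.length : Int)
  (List.range 26).foldl (fun k pos =>
    let letter := Char.ofNat (97 + pos)
    let st := (PySem.List.enumerate chars).foldl
      (fun (st : Int × Int) (p : Int × Char) =>
        if letter = p.2 then (max st.1 (p.1 - st.2), p.1) else st) (0, 0)
    min (max st.1 (n - st.2)) k) n

-- ===== PORT B =====
def minKDominant_alt (inputChars : String) : Int :=
  let chars := inputChars.toList
  let n : Int := (chars.length : Int)
  let buckets := (PySem.List.enumerate chars).foldl
    (fun (bs : List (List Int)) (p : Int × Char) =>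
      let q : Int := (p.2.toNat : Int) - 97
      if 0 ≤ q ∧ q < 26 then bs.modify q.toNat (fun occ => occ ++ [p.1]) else bs)
    (List.replicate 26 ([] : List Int))
  buckets.foldl (fun k occ =>
    match occ with
    | [] => k
    | o0 :: rest =>
      let gp := rest.foldl (fun (gp : Int × Int) b => (max gp.1 (b - gp.2), b)) (o0, o0)
      min k (max gp.1 (n - gp.2))) n

-- ===== PRECONDITION & SPEC =====
def Spec_minKDominant (inputChars : String) (out : Int) : Prop := out = minKDominant_alt inputChars
instance (inputChars : String) (out : Int) : Decidable (Spec_minKDominant inputChars out) := by unfold Spec_minKDominant; infer_instance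

-- ===== CLAIM (what is proved, stated in full; the proofs are below) =====
def Claim_equal_minKDominant : Prop := ∀ (inputChars : String), Dom_minKDominant inputChars → Spec_minKDominant inputChars (minKDominant inputChars)

-- ===== LEMMAS AND PROOFS =====

-- proof-side name for B's grouping step (defeq to the lambda in the port)
def stepB (bs : List (List Int)) (p : Int × Char) : List (List Int) :=
  let q : Int := (p.2.toNat : Int) - 97
  if 0 ≤ q ∧ q < 26 then bs.modify q.toNat (fun occ => occ ++ [p.1]) else bs

-- proof-side name for B's per-bucket update (defeq to the lambda in the port)
def bumpB (n k : Int) (occ : List Int) : Int :=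
  match occ with
  | [] => k
  | o0 :: rest =>
    let gp := rest.foldl (fun (gp : Int × Int) b => (max gp.1 (b - gp.2), b)) (o0, o0)
    min k (max gp.1 (n - gp.2))

theorem bumpB_le (n k : Int) (hk : k ≤ n) (occ : List Int) : bumpB n k occ ≤ n := by
  cases occ with
  | nil => exact hk
  | cons o0 rest => exact le_trans (min_le_left _ _) hk

-- occurrence indices of character c in the enumerated list l
def posOf (c : Char) (l : List (Int × Char)) : List Int :=
  l.filterMap (fun p => if c = p.2 then some p.1 else none)

theorem posOf_cons (c : Char) (x : Int × Char) (xs : List (Int × Char)) :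
    posOf c (x :: xs) = if c = x.2 then x.1 :: posOf c xs else posOf c xs := by
  simp only [posOf, List.filterMap_cons]
  by_cases h : c = x.2 <;> simp [h]

-- A's guarded inner loop is the same fold over the filtered occurrence list
theorem foldl_guard {s : Type} (c : Char) (l : List (Int × Char)) (step : s → Int → s) :
    ∀ st : s, l.foldl (fun s p => if c = p.2 then step s p.1 else s) st
      = (posOf c l).foldl step st := by
  induction l with
  | nil => intro st; simp [posOf]
  | cons x xs ih =>
    intro st
    rw [List.foldl_cons, posOf_cons]
    by_cases h : c = x.2
    · rw [if_pos h, if_pos h, List.foldl_cons]; exact ih _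
    · rw [if_neg h, if_neg h]; exact ih _

theorem getD_modify (l : List (List Int)) (i j : Nat) (f : List Int → List Int) :
    (l.modify i f).getD j [] =
      if i = j ∧ j < l.length then f (l.getD j []) else l.getD j [] := by
  rw [List.getD_eq_getElem?_getD, List.getD_eq_getElem?_getD, List.getElem?_modify]
  by_cases hj : j < l.length
  · rw [List.getElem?_eq_getElem hj]
    by_cases hij : i = j <;> simp [hij, hj]
  · rw [List.getElem?_eq_none (by omega)]
    simp [hj]

theorem char_eq_iff (p : Nat) (hp : p < 26) (ch : Char) :
    Char.ofNat (97 + p) = ch ↔ ch.toNat = 97 + p := by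
  have hv : (97 + p).isValidChar := by unfold Nat.isValidChar; omega
  constructor
  · intro h; rw [← h]; simp [Char.ofNat, hv]
  · intro h
    apply Char.ext
    apply UInt32.toNat_inj.mp
    show (Char.ofNat (97 + p)).toNat = ch.toNat
    rw [h]; simp [Char.ofNat, hv]

-- the grouping fold builds exactly the per-letter occurrence lists
theorem buckets_spec (l : List (Int × Char)) :
    ∀ bs : List (List Int), bs.length = 26 →
      (l.foldl stepB bs).length = 26
      ∧ ∀ p : Nat, p < 26 →
        (l.foldl stepB bs).getD p [] = bs.getD p [] ++ posOf (Char.ofNat (97 + p)) l := by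
  induction l with
  | nil => intro bs hbs; simp [posOf, hbs]
  | cons x xs ih =>
    intro bs hbs
    rw [List.foldl_cons]
    by_cases h : (0:Int) ≤ (x.2.toNat : Int) - 97 ∧ (x.2.toNat : Int) - 97 < 26
    · have hx : stepB bs x = bs.modify ((x.2.toNat : Int) - 97).toNat (fun occ => occ ++ [x.1]) := by
        simp only [stepB]; rw [if_pos h]
      rw [hx]
      have hlen : (bs.modify ((x.2.toNat : Int) - 97).toNat (fun occ => occ ++ [x.1])).length = 26 := by
        rw [List.length_modify]; exact hbs
      obtain ⟨h1, h2⟩ := ih _ hlen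
      refine ⟨h1, ?_⟩
      intro p hp
      rw [h2 p hp, getD_modify, posOf_cons]
      by_cases hpq : ((x.2.toNat : Int) - 97).toNat = p
      · have hch : Char.ofNat (97 + p) = x.2 := (char_eq_iff p hp x.2).mpr (by omega)
        rw [if_pos ⟨hpq, by omega⟩, if_pos hch]
        simp
      · have hch : ¬ (Char.ofNat (97 + p) = x.2) := by
          rw [char_eq_iff p hp x.2]; omega
        rw [if_neg (by tauto), if_neg hch]
    · have hx : stepB bs x = bs := by simp only [stepB]; rw [if_neg h]
      rw [hx]
      obtain ⟨h1, h2⟩ := ih bs hbs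
      refine ⟨h1, ?_⟩
      intro p hp
      have hch : ¬ (Char.ofNat (97 + p) = x.2) := by
        rw [char_eq_iff p hp x.2]; omega
      rw [h2 p hp, posOf_cons, if_neg hch]

-- bucket list as a map over letter indices
theorem buckets_eq_map (l : List (Int × Char)) :
    l.foldl stepB (List.replicate 26 ([] : List Int))
      = (List.range 26).map (fun p => posOf (Char.ofNat (97 + p)) l) := by
  obtain ⟨h1, h2⟩ := buckets_spec l (List.replicate 26 ([] : List Int)) (List.length_replicate)
  apply List.ext_getElem
  · rw [h1, List.length_map, List.length_range]
  intro i hi1 hi2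
  have hi : i < 26 := by rw [h1] at hi1; exact hi1
  have h3 := h2 i hi
  rw [List.getD_eq_getElem?_getD, List.getElem?_eq_getElem hi1, Option.getD_some,
    List.getD_eq_getElem?_getD, List.getElem?_replicate] at h3
  rw [List.getElem_map, List.getElem_range, h3]
  simp [hi]

-- positions are nonnegative
theorem posOf_nonneg (c : Char) (chars : List Char) :
    ∀ x ∈ posOf c (PySem.List.enumerate chars), 0 ≤ x := by
  intro x hx
  simp only [posOf, List.mem_filterMap] at hx
  obtain ⟨p, hp, hpx⟩ := hx
  have hfst : p.1 ∈ (PySem.List.enumerate chars).map (·.1) := List.mem_map_of_mem hp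
  rw [PySem.List.map_fst_enumerate] at hfst
  have := (PySem.List.mem_pyRange_one).mp hfst
  split at hpx <;> simp_all

-- per-letter agreement: A's scan value min'ed into k equals B's bucket update
theorem elt_eq (n k : Int) (hk : k ≤ n) (hn : 0 ≤ n) (ps : List Int) (hps : ∀ x ∈ ps, 0 ≤ x) :
    (min (max (ps.foldl (fun (st : Int × Int) i => (max st.1 (i - st.2), i)) (0, 0)).1
         (n - (ps.foldl (fun (st : Int × Int) i => (max st.1 (i - st.2), i)) (0, 0)).2)) k)
    = bumpB n k ps := by
  cases ps with
  | nil =>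
    simp only [List.foldl_nil, bumpB]
    have h0 : max (0:Int) (n - 0) = n := by omega
    rw [h0]; omega
  | cons o0 rest =>
    have ho : (0:Int) ≤ o0 := hps o0 (List.mem_cons_self)
    simp only [List.foldl_cons]
    have h1 : (max (0:Int) (o0 - 0), o0) = (o0, o0) := by
      rw [Prod.mk.injEq]; constructor
      · omega
      · rfl
    rw [h1]
    simp only [bumpB]
    rw [min_comm]

-- the two outer folds agree on any index list, given that k starts ≤ n
theorem outer_eq (n : Int) (hn : 0 ≤ n) (l : List (Int × Char))
    (h0 : ∀ c, ∀ x ∈ posOf c l, 0 ≤ x) :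
    ∀ (idxs : List Nat) (k : Int), k ≤ n →
      idxs.foldl (fun k pos =>
        min (max ((posOf (Char.ofNat (97 + pos)) l).foldl
            (fun (st : Int × Int) i => (max st.1 (i - st.2), i)) (0, 0)).1
          (n - ((posOf (Char.ofNat (97 + pos)) l).foldl
            (fun (st : Int × Int) i => (max st.1 (i - st.2), i)) (0, 0)).2)) k) k
      = idxs.foldl (fun k pos => bumpB n k (posOf (Char.ofNat (97 + pos)) l)) k := by
  intro idxs
  induction idxs with
  | nil => intro k _; rfl
  | cons p ps ih =>
    intro k hk
    simp only [List.foldl_cons]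
    rw [elt_eq n k hk hn _ (h0 _)]
    exact ih _ (bumpB_le n k hk _)

-- ===== VERDICT (by name: the statement is the Claim_ definition above) =====
theorem minKDominant_spec : Claim_equal_minKDominant := by
  intro s _
  unfold Spec_minKDominant minKDominant minKDominant_alt
  simp only
  have hB : (fun (bs : List (List Int)) (p : Int × Char) =>
      let q : Int := (p.2.toNat : Int) - 97
      if 0 ≤ q ∧ q < 26 then bs.modify q.toNat (fun occ => occ ++ [p.1]) else bs) = stepB := rfl
  rw [hB, buckets_eq_map, List.foldl_map]
  set l := PySem.List.enumerate s.toList with hl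
  set n : Int := (s.toList.length : Int) with hn
  have hA : (fun (k : Int) (pos : Nat) =>
      let letter := Char.ofNat (97 + pos)
      let st := l.foldl (fun (st : Int × Int) (p : Int × Char) =>
        if letter = p.2 then (max st.1 (p.1 - st.2), p.1) else st) (0, 0)
      min (max st.1 (n - st.2)) k)
      = (fun (k : Int) (pos : Nat) =>
          min (max ((posOf (Char.ofNat (97 + pos)) l).foldl
              (fun (st : Int × Int) i => (max st.1 (i - st.2), i)) (0, 0)).1
            (n - ((posOf (Char.ofNat (97 + pos)) l).foldl
              (fun (st : Int × Int) i => (max st.1 (i - st.2), i)) (0, 0)).2)) k) := by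
    funext k pos
    simp only
    rw [foldl_guard (Char.ofNat (97 + pos)) l (fun (st : Int × Int) i => (max st.1 (i - st.2), i)) (0, 0)]
  rw [hA]
  exact outer_eq n (Int.natCast_nonneg _) l (fun c => posOf_nonneg c s.toList) (List.range 26) n le_rfl
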